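-- pv_equiv track=rewrite | github.com/bz-GAO/RinaChanBoard | rina_context.py | _safe_cut_point
-- ===== SOURCE A (Python) =====
-- def _safe_cut_point(messages, cut_index):
--     """
--     如果 cut_index 把一个 assistant(tool_calls) 和它的 tool 响应切开了，
--     就把 cut_index 往前挪到那个 assistant 之前，避免 API 报错。
--     """
--     if cut_index <= 0 or cut_index >= len(messages):
--         return cut_index
--
--     # 如果切点正好是 tool 消息，往前找到它对应的 assistant
--     while cut_index < len(messages) and messages[cut_index].get("role") == "tool":
--         cut_index -= 1
--         if cut_index < 0:
--             return 0
--
--     # 如果切点之后紧跟 tool，但切点自己不是带 tool_calls 的 assistant，说明切坏了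
--     # 简化处理：往前找到最近一个 user 消息作为安全切点
--     while cut_index > 0 and messages[cut_index].get("role") != "user":
--         cut_index -= 1
--     return cut_index
-- ===== SOURCE B (Python) =====
-- def _safe_cut_point(messages, cut_index):
--     if cut_index <= 0 or cut_index >= len(messages):
--         return cut_index
--     last = 0
--     for i in range(1, cut_index + 1):
--         if messages[i].get("role") == "user":
--             last = i
--     return last
-- ===== Notes on version B (the rewrite author's own statement) =====
-- stated objective: simpler
-- what changed: Replaces the two backward while-loops (skip tool messages, then walk back to the nearest user) with a single forward pass over the prefix that keeps the last index whose role is 'user' (defaulting to 0).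
import Mathlib
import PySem

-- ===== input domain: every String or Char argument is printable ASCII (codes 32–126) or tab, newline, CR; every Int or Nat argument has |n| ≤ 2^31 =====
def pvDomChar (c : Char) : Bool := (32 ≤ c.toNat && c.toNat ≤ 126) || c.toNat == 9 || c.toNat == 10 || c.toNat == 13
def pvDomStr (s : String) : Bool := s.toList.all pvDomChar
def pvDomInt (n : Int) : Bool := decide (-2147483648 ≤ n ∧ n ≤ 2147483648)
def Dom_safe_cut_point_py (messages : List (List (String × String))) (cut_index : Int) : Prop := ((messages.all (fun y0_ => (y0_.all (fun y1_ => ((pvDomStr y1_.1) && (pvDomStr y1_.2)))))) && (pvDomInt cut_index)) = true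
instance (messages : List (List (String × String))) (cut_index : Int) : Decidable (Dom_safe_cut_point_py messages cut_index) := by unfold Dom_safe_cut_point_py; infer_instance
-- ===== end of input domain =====

-- B replaces A's two backward while-loops with a single forward pass keeping the last 'user' index (objective: simpler; same cost).


-- ===== PORT A =====
-- messages[i].get("role") for an in-range index i: dict lookup on the i-th message
def pvRoleAt (messages : List (List (String × String))) (i : Nat) : Option String :=
  match messages[i]? with
  | some m => (PySem.Dict.mk m).get? "role"
  | none => none

-- second while-loop of A: walk backward to the nearest "user" message (or index 0)
def pvLoopA2 (messages : List (List (String × String))) : Nat -> Int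
  | 0 => (0 : Int)
  | c + 1 =>
    if !(pvRoleAt messages (c + 1) == some "user") then pvLoopA2 messages c
    else ((c : Int) + 1)

-- first while-loop of A: skip backward over "tool" messages, returning 0 if it runs off the front
def pvLoopA1 (messages : List (List (String × String))) : Nat -> Int
  | 0 =>
    if 0 < messages.length && pvRoleAt messages 0 == some "tool" then 0
    else pvLoopA2 messages 0
  | c + 1 =>
    if c + 1 < messages.length && pvRoleAt messages (c + 1) == some "tool" then
      pvLoopA1 messages c
    else pvLoopA2 messages (c + 1)

def safe_cut_point_py (messages : List (List (String × String))) (cut_index : Int) : Int :=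
  if cut_index ≤ 0 || cut_index ≥ (messages.length : Int) then cut_index
  else pvLoopA1 messages cut_index.toNat

-- ===== PORT B =====
-- forward pass: for i in range(1, cut_index+1): last = i if role is "user"
def safe_cut_point_py_alt (messages : List (List (String × String))) (cut_index : Int) : Int :=
  if cut_index ≤ 0 || cut_index ≥ (messages.length : Int) then cut_index
  else
    (PySem.List.pyRange 1 (cut_index + 1) 1).foldl
      (fun last i =>
        if ((PySem.List.pyGet? messages i).bind (fun m => (PySem.Dict.mk m).get? "role")) == some "user"
        then i else last) 0

-- ===== PRECONDITION & SPEC =====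
def Spec_safe_cut_point_py (messages : List (List (String × String))) (cut_index : Int) (out : Int) : Prop := out = safe_cut_point_py_alt messages cut_index
instance (messages : List (List (String × String))) (cut_index : Int) (out : Int) : Decidable (Spec_safe_cut_point_py messages cut_index out) := by unfold Spec_safe_cut_point_py; infer_instance

-- ===== CLAIM (what is proved, stated in full; the proofs are below) =====
def Claim_equal_safe_cut_point_py : Prop := ∀ (messages : List (List (String × String))) (cut_index : Int), Dom_safe_cut_point_py messages cut_index → Spec_safe_cut_point_py messages cut_index (safe_cut_point_py messages cut_index)

-- ===== LEMMAS AND PROOFS =====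
-- reference function: greatest i ≤ c with role "user", else 0
def pvBack (messages : List (List (String × String))) : Nat -> Nat
  | 0 => 0
  | c + 1 => if pvRoleAt messages (c + 1) == some "user" then c + 1 else pvBack messages c

theorem pvLoopA2_eq_back (messages : List (List (String × String))) (c : Nat) :
    pvLoopA2 messages c = (pvBack messages c : Int) := by
  induction c with
  | zero => simp [pvLoopA2, pvBack]
  | succ n ih =>
    rw [pvLoopA2, pvBack]
    by_cases h : pvRoleAt messages (n + 1) == some "user" <;> simp [h, ih]

theorem pvLoopA1_eq_back (messages : List (List (String × String))) (c : Nat) :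
    pvLoopA1 messages c = (pvBack messages c : Int) := by
  induction c with
  | zero =>
    rw [pvLoopA1]
    split
    · simp [pvBack]
    · rw [pvLoopA2_eq_back]
  | succ n ih =>
    rw [pvLoopA1]
    split
    · next h =>
      rw [ih, pvBack]
      have : ¬ (pvRoleAt messages (n + 1) == some "user") = true := by
        simp only [Bool.and_eq_true, beq_iff_eq] at h ⊢
        simp [h.2]
      simp [this]
    · rw [pvLoopA2_eq_back]

theorem pvFold_eq_back (messages : List (List (String × String))) (c : Nat) :
    (PySem.List.pyRange 1 ((c : Int) + 1) 1).foldl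
      (fun last i =>
        if ((PySem.List.pyGet? messages i).bind (fun m => (PySem.Dict.mk m).get? "role")) == some "user"
        then i else last) 0 = (pvBack messages c : Int) := by
  induction c with
  | zero => simp [PySem.List.pyRange_one_eq_nil, pvBack]
  | succ n ih =>
    have h1 : (1 : Int) ≤ (n : Int) + 1 := by omega
    rw [show ((n + 1 : Nat) : Int) + 1 = ((n : Int) + 1) + 1 by push_cast; ring,
        PySem.List.pyRange_one_succ_right h1, List.foldl_append, ih]
    simp only [List.foldl_cons, List.foldl_nil]
    have hget : PySem.List.pyGet? messages ((n : Int) + 1) = messages[n + 1]? := by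
      rw [show ((n : Int) + 1) = ((n + 1 : Nat) : Int) by push_cast; ring,
          PySem.List.pyGet?_natCast]
    rw [pvBack, hget]
    by_cases h : pvRoleAt messages (n + 1) == some "user"
    · simp only [beq_iff_eq] at h
      have : (messages[n + 1]?.bind (fun m => (PySem.Dict.mk m).get? "role")) = some "user" := by
        unfold pvRoleAt at h
        cases hm : messages[n + 1]? <;> simp [hm] at h ⊢ <;> simp [h]
      simp [this, h]
    · simp only [beq_iff_eq] at h
      have : ¬ (messages[n + 1]?.bind (fun m => (PySem.Dict.mk m).get? "role")) = some "user" := by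
        unfold pvRoleAt at h
        cases hm : messages[n + 1]? <;> simp [hm] at h ⊢ <;> simp [h]
      simp [this, h]

-- ===== VERDICT (by name: the statement is the Claim_ definition above) =====
theorem safe_cut_point_py_spec : Claim_equal_safe_cut_point_py := by
  intro messages cut_index _
  unfold Spec_safe_cut_point_py safe_cut_point_py safe_cut_point_py_alt
  split
  · rfl
  · next h =>
    simp only [Bool.or_eq_true, decide_eq_true_eq, not_or] at h
    have hpos : 0 < cut_index := by omega
    have hc : ((cut_index.toNat : Nat) : Int) = cut_index := Int.toNat_of_nonneg (by omega)
    rw [pvLoopA1_eq_back, ← pvFold_eq_back, hc]
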